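-- pv_equiv track=rewrite | github.com/tanatron/sheet-score_ | python-api/main.py | _calculate_shear
-- ===== SOURCE A (Python) =====
-- ANS_Y_ROWS = [244,  288,  330,  372,  414,  458,  500,  542,  586,  628,
--               670,  712,  756,  798,  842,  884,  928,  970, 1014, 1056]
--
-- SNAP             = 32
--
-- def _calculate_shear(bubbles, grid):
--     """คำนวณการเยื้อง (Shear) ของวงกลมคำตอบ เมื่อเทียบกับแกนตั้งฉาก"""
--     ans_y_rows = grid.get("ANS_Y_ROWS", ANS_Y_ROWS)
--     shear_offsets = []
--
--     for row_y in ans_y_rows: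
--         row_bubbles = [b for b in bubbles if abs(b[1] - row_y) < SNAP]
--         if not row_bubbles:
--             shear_offsets.append(0)
--             continue
--
--         row_xs = [b[0] for b in row_bubbles]
--
--         # หาวงกลมที่ใกล้เคียงกับคอลัมน์ A (คอลัมน์แรก) ของแต่ละกลุ่มมากที่สุด
--         g0_a_diffs = [abs(x - grid["ANS_X_G0"][0]) for x in row_xs]
--         g1_a_diffs = [abs(x - grid["ANS_X_G1"][0]) for x in row_xs]
--         g2_a_diffs = [abs(x - grid["ANS_X_G2"][0]) for x in row_xs]
--
--         min_diffs = []
--         if g0_a_diffs: min_diffs.append(min(g0_a_diffs))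
--         if g1_a_diffs: min_diffs.append(min(g1_a_diffs))
--         if g2_a_diffs: min_diffs.append(min(g2_a_diffs))
--
--         # ถ้าระยะห่างน้อยกว่า 30 แปลว่าเราเจอจุดอ้างอิงที่ดี เอามาคำนวณ shear ได้เลย
--         best_shear = 0
--         if min_diffs and min(min_diffs) < 30:
--             if min_diffs[0] == min(min_diffs):
--                 best_shear = row_xs[g0_a_diffs.index(min(min_diffs))] - grid["ANS_X_G0"][0]
--             elif len(min_diffs) > 1 and min_diffs[1] == min(min_diffs):
--                 best_shear = row_xs[g1_a_diffs.index(min(min_diffs))] - grid["ANS_X_G1"][0]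
--             elif len(min_diffs) > 2 and min_diffs[2] == min(min_diffs):
--                 best_shear = row_xs[g2_a_diffs.index(min(min_diffs))] - grid["ANS_X_G2"][0]
--
--         shear_offsets.append(int(best_shear))
--
--     return shear_offsets
-- ===== SOURCE B (Python) =====
-- ANS_Y_ROWS = [244,  288,  330,  372,  414,  458,  500,  542,  586,  628,
--               670,  712,  756,  798,  842,  884,  928,  970, 1014, 1056]
--
-- SNAP = 32
--
--
-- def _upd(best, x, a):
--     """Keep the (diff, x) pair with the smallest diff, first occurrence wins."""
--     d = abs(x - a)
--     if best is None or d < best[0]: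
--         return (d, x)
--     return best
--
--
-- def _calculate_shear(bubbles, grid):
--     # Single fused pass per row: three running (min-diff, argmin-x) accumulators
--     # replace the filtered list, the three diff lists and the min/.index rescans.
--     rows = grid.get("ANS_Y_ROWS", ANS_Y_ROWS)
--     out = []
--     for row_y in rows:
--         b0 = b1 = b2 = None
--         for x, y in bubbles:
--             if abs(y - row_y) < SNAP:
--                 b0 = _upd(b0, x, grid["ANS_X_G0"][0])
--                 b1 = _upd(b1, x, grid["ANS_X_G1"][0])
--                 b2 = _upd(b2, x, grid["ANS_X_G2"][0])
--         if b0 is None: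
--             out.append(0)
--             continue
--         m = min(b0[0], b1[0], b2[0])
--         if m >= 30:
--             out.append(0)
--         elif b0[0] == m:
--             out.append(b0[1] - grid["ANS_X_G0"][0])
--         elif b1[0] == m:
--             out.append(b1[1] - grid["ANS_X_G1"][0])
--         else:
--             out.append(b2[1] - grid["ANS_X_G2"][0])
--     return out
-- ===== Notes on version B (the rewrite author's own statement) =====
-- stated objective: simpler
-- what changed: Per row, A builds a filtered bubble list, three whole diff lists, takes min() of each and rescans with .index(); B makes one fused pass over the bubbles keeping three (min-diff, first-argmin-x) accumulators and reads the answer off them.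
import Mathlib
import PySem

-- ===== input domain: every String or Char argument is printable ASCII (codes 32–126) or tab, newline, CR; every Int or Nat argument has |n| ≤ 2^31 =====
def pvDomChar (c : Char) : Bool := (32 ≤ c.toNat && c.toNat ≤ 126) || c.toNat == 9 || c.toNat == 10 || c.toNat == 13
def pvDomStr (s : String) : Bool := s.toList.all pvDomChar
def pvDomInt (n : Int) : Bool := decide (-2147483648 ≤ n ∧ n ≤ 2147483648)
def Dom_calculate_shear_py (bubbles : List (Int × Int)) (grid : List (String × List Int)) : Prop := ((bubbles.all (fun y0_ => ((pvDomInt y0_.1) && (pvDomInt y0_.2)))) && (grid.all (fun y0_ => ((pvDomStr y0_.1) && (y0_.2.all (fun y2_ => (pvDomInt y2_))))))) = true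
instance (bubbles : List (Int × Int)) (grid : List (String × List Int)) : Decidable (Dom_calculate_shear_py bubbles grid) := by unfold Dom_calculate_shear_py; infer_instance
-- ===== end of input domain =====

-- B replaces A's per-row filtered list, three diff lists and min/.index rescans by one fused
-- pass over the bubbles keeping three (min-diff, argmin-x) accumulators (objective: simpler).

-- module constant ANS_Y_ROWS
def pvANS_Y_ROWS : List Int := [244, 288, 330, 372, 414, 458, 500, 542, 586, 628,
                                670, 712, 756, 798, 842, 884, 928, 970, 1014, 1056]

-- grid[k][0]; exact wherever the Pythons reach it (Pre_ makes the key present with a nonempty list)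
def pvAnchor (grid : List (String × List Int)) (k : String) : Int :=
  PySem.List.pyGetD ((List.lookup k grid).getD []) 0 0

-- ===== PORT A =====
-- one iteration of A's row loop (the loop appends exactly one offset per row; SNAP = 32)
def pvRowA (bubbles : List (Int × Int)) (grid : List (String × List Int)) (row_y : Int) : Int :=
  let row_bubbles := bubbles.filter (fun b => |b.2 - row_y| < 32)
  if row_bubbles = [] then 0
  else
    let row_xs := row_bubbles.map (·.1)
    let a0 := pvAnchor grid "ANS_X_G0"
    let a1 := pvAnchor grid "ANS_X_G1"
    let a2 := pvAnchor grid "ANS_X_G2"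
    let d0 := row_xs.map (fun x => |x - a0|)
    let d1 := row_xs.map (fun x => |x - a1|)
    let d2 := row_xs.map (fun x => |x - a2|)
    let m0 := (PySem.List.min? d0 (fun v => v)).getD 0
    let m1 := (PySem.List.min? d1 (fun v => v)).getD 0
    let m2 := (PySem.List.min? d2 (fun v => v)).getD 0
    let m := (PySem.List.min? [m0, m1, m2] (fun v => v)).getD 0
    if m < 30 then
      if m0 = m then PySem.List.pyGetD row_xs (((PySem.List.index? d0 m).getD 0 : Nat) : Int) 0 - a0
      else if m1 = m then PySem.List.pyGetD row_xs (((PySem.List.index? d1 m).getD 0 : Nat) : Int) 0 - a1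
      else if m2 = m then PySem.List.pyGetD row_xs (((PySem.List.index? d2 m).getD 0 : Nat) : Int) 0 - a2
      else 0
    else 0

def calculate_shear_py (bubbles : List (Int × Int)) (grid : List (String × List Int)) : List Int :=
  let ans_y_rows := (List.lookup "ANS_Y_ROWS" grid).getD pvANS_Y_ROWS
  ans_y_rows.map (fun row_y => pvRowA bubbles grid row_y)

-- ===== PORT B =====
-- Source B's _upd: keep the (diff, x) pair with the smallest diff, first occurrence wins
def pvUpd (best : Option (Int × Int)) (x a : Int) : Option (Int × Int) :=
  let d := |x - a|
  match best with
  | none => some (d, x)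
  | some (d0, x0) => if d < d0 then (d, x) else (d0, x0)

-- one iteration of B's row loop
def pvRowB (bubbles : List (Int × Int)) (grid : List (String × List Int)) (row_y : Int) : Int :=
  let s := bubbles.foldl
    (fun (s : Option (Int × Int) × Option (Int × Int) × Option (Int × Int)) b =>
      if |b.2 - row_y| < 32 then
        (pvUpd s.1 b.1 (pvAnchor grid "ANS_X_G0"),
         pvUpd s.2.1 b.1 (pvAnchor grid "ANS_X_G1"),
         pvUpd s.2.2 b.1 (pvAnchor grid "ANS_X_G2"))
      else s)
    (none, none, none)
  match s with
  | (some (e0, x0), some (e1, x1), some (e2, x2)) =>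
      let m := min e0 (min e1 e2)
      if 30 ≤ m then 0
      else if e0 = m then x0 - pvAnchor grid "ANS_X_G0"
      else if e1 = m then x1 - pvAnchor grid "ANS_X_G1"
      else x2 - pvAnchor grid "ANS_X_G2"
  | _ => 0

def calculate_shear_py_alt (bubbles : List (Int × Int)) (grid : List (String × List Int)) : List Int :=
  let rows := (List.lookup "ANS_Y_ROWS" grid).getD pvANS_Y_ROWS
  rows.map (fun row_y => pvRowB bubbles grid row_y)

-- ===== PRECONDITION & SPEC =====
-- Pre_ excludes exactly the inputs where Python A raises: whenever some bubble snaps to some row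
-- (so the anchor lookups grid["ANS_X_G?"][0] are reached), the three anchor keys must be present
-- with nonempty value lists (otherwise KeyError/IndexError).
def Pre_calculate_shear_py (bubbles : List (Int × Int)) (grid : List (String × List Int)) : Prop :=
  (∃ r ∈ (List.lookup "ANS_Y_ROWS" grid).getD pvANS_Y_ROWS, ∃ b ∈ bubbles, |b.2 - r| < 32) →
    (∀ k ∈ ["ANS_X_G0", "ANS_X_G1", "ANS_X_G2"], ∃ v, List.lookup k grid = some v ∧ v ≠ [])
instance (bubbles : List (Int × Int)) (grid : List (String × List Int)) : Decidable (Pre_calculate_shear_py bubbles grid) := by unfold Pre_calculate_shear_py; infer_instance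

def pvWitness_calculate_shear_py : (List (Int × Int)) × (List (String × List Int)) :=
  ([(10, 244), (52, 290)], [("ANS_X_G0", [12]), ("ANS_X_G1", [50]), ("ANS_X_G2", [90])])

def Spec_calculate_shear_py (bubbles : List (Int × Int)) (grid : List (String × List Int)) (out : List Int) : Prop := out = calculate_shear_py_alt bubbles grid
instance (bubbles : List (Int × Int)) (grid : List (String × List Int)) (out : List Int) : Decidable (Spec_calculate_shear_py bubbles grid out) := by unfold Spec_calculate_shear_py; infer_instance

-- ===== CLAIM (what is proved, stated in full; the proofs are below) =====
def Claim_equal_calculate_shear_py : Prop := ∀ (bubbles : List (Int × Int)) (grid : List (String × List Int)), Dom_calculate_shear_py bubbles grid → Pre_calculate_shear_py bubbles grid → Spec_calculate_shear_py bubbles grid (calculate_shear_py bubbles grid)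

-- ===== LEMMAS AND PROOFS =====

-- appending one value to a nonempty list takes the Python min of the old min and the value
lemma pv_min_append (l : List Int) (hl : l ≠ []) (v : Int) :
    PySem.List.min? (l ++ [v]) (fun x => x) = some (min ((PySem.List.min? l (fun x => x)).getD 0) v) := by
  obtain ⟨c, t, rfl⟩ := List.exists_cons_of_ne_nil hl
  simp [PySem.List.min?_id_cons, List.foldl_append]

-- the single accumulator fold computes the group's min diff and the first x attaining it
lemma pv_fold_char (a : Int) :
    ∀ (xs : List Int), xs ≠ [] →
      xs.foldl (fun s x => pvUpd s x a) none =
        some ((PySem.List.min? (xs.map (fun x => |x - a|)) (fun v => v)).getD 0,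
              PySem.List.pyGetD xs
                (((PySem.List.index? (xs.map (fun x => |x - a|))
                    ((PySem.List.min? (xs.map (fun x => |x - a|)) (fun v => v)).getD 0)).getD 0 : Nat) : Int) 0) := by
  intro xs
  induction xs using List.reverseRecOn with
  | nil => intro h; exact absurd rfl h
  | append_singleton ys x ih =>
    intro _
    by_cases hys : ys = []
    · subst hys
      simp [pvUpd, PySem.List.min?_id_cons]
    · have hIH := ih hys
      have hmin : PySem.List.min? (ys.map (fun x => |x - a|)) (fun v => v) =
          some ((PySem.List.min? (ys.map (fun x => |x - a|)) (fun v => v)).getD 0) := by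
        obtain ⟨c, t, rfl⟩ := List.exists_cons_of_ne_nil hys
        simp [PySem.List.min?_id_cons]
      set M := (PySem.List.min? (ys.map (fun x => |x - a|)) (fun v => v)).getD 0 with hM
      have hisMin : ∀ y ∈ ys.map (fun x => |x - a|), M ≤ y := by
        intro y hy
        have := PySem.List.min?_isMin hmin y hy
        simpa using this
      have hmem : M ∈ ys.map (fun x => |x - a|) := PySem.List.min?_mem hmin
      rw [List.foldl_append, hIH]
      have hmap : (ys ++ [x]).map (fun x => |x - a|) = ys.map (fun x => |x - a|) ++ [|x - a|] := by simp
      rw [hmap, pv_min_append _ (by simp [hys]) _, ← hM]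
      by_cases hlt : |x - a| < M
      · have hnm : |x - a| ∉ ys.map (fun x => |x - a|) := fun hc => absurd (hisMin _ hc) (by omega)
        rw [min_eq_right (le_of_lt hlt)]
        simp only [Option.getD_some]
        rw [PySem.List.index?_append_singleton_self _ _ hnm]
        simp [pvUpd, hlt]
      · rw [min_eq_left (by omega)]
        simp only [Option.getD_some]
        rw [PySem.List.index?_append_of_mem _ hmem]
        obtain ⟨j, hj⟩ : ∃ j, PySem.List.index? (ys.map (fun x => |x - a|)) M = some j := by
          have := PySem.List.index?_isSome_iff (xs := ys.map (fun x => |x - a|)) (v := M)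
          exact Option.isSome_iff_exists.mp (this.mpr hmem)
        obtain ⟨hjlt, -, -⟩ := PySem.List.getElem_of_index?_eq_some hj
        rw [hj]
        simp only [Option.getD_some]
        simp [pvUpd, hlt]
        simp at hjlt
        rw [List.getElem?_append_left hjlt]

-- B's guarded triple fold over the bubbles is the triple of plain folds over the filtered xs
lemma pv_fold_split (row_y a0 a1 a2 : Int) :
    ∀ (bubbles : List (Int × Int)) (s0 s1 s2 : Option (Int × Int)),
      bubbles.foldl
        (fun (s : Option (Int × Int) × Option (Int × Int) × Option (Int × Int)) b =>
          if |b.2 - row_y| < 32 then (pvUpd s.1 b.1 a0, pvUpd s.2.1 b.1 a1, pvUpd s.2.2 b.1 a2)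
          else s) (s0, s1, s2)
      = (((bubbles.filter (fun b => |b.2 - row_y| < 32)).map (·.1)).foldl (fun s x => pvUpd s x a0) s0,
         ((bubbles.filter (fun b => |b.2 - row_y| < 32)).map (·.1)).foldl (fun s x => pvUpd s x a1) s1,
         ((bubbles.filter (fun b => |b.2 - row_y| < 32)).map (·.1)).foldl (fun s x => pvUpd s x a2) s2) := by
  intro bubbles
  induction bubbles with
  | nil => intro s0 s1 s2; simp
  | cons b bs ih =>
    intro s0 s1 s2
    by_cases h : |b.2 - row_y| < 32
    · simp [List.foldl, h, ih]
    · simp [List.foldl, h, ih]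

-- the two row bodies agree
lemma pv_row_eq (bubbles : List (Int × Int)) (grid : List (String × List Int)) (row_y : Int) :
    pvRowA bubbles grid row_y = pvRowB bubbles grid row_y := by
  unfold pvRowA pvRowB
  rw [pv_fold_split]
  set xs := (bubbles.filter (fun b => |b.2 - row_y| < 32)).map (·.1) with hxs
  by_cases hnil : bubbles.filter (fun b => |b.2 - row_y| < 32) = []
  · simp [hnil, hxs]
  · have hxne : xs ≠ [] := by simp [hxs, hnil]
    set a0 := pvAnchor grid "ANS_X_G0"
    set a1 := pvAnchor grid "ANS_X_G1"
    set a2 := pvAnchor grid "ANS_X_G2"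
    rw [pv_fold_char a0 xs hxne, pv_fold_char a1 xs hxne, pv_fold_char a2 xs hxne]
    simp only [hnil]
    set m0 := (PySem.List.min? (xs.map (fun x => |x - a0|)) (fun v => v)).getD 0 with hm0
    set m1 := (PySem.List.min? (xs.map (fun x => |x - a1|)) (fun v => v)).getD 0 with hm1
    set m2 := (PySem.List.min? (xs.map (fun x => |x - a2|)) (fun v => v)).getD 0 with hm2
    have hmA : (PySem.List.min? [m0, m1, m2] (fun v => v)).getD 0 = min m0 (min m1 m2) := by
      simp [PySem.List.min?_id_cons, min_assoc]
    rw [hmA]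
    set m := min m0 (min m1 m2) with hm
    have hcases : m = m0 ∨ m = m1 ∨ m = m2 := by
      rcases le_total m0 (min m1 m2) with h | h
      · left; rw [hm, min_eq_left h]
      · rcases le_total m1 m2 with h2 | h2
        · right; left; rw [hm, min_eq_right h, min_eq_left h2]
        · right; right; rw [hm, min_eq_right h, min_eq_right h2]
    by_cases h30 : m < 30
    · rw [if_pos h30, if_neg (not_le.mpr h30)]
      by_cases h0 : m0 = m
      · rw [if_pos h0, if_pos h0, ← h0, if_neg (fun h => h)]
      · rw [if_neg h0, if_neg h0]
        by_cases h1 : m1 = m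
        · rw [if_pos h1, if_pos h1, ← h1, if_neg (fun h => h)]
        · rw [if_neg h1, if_neg h1]
          have h2 : m2 = m := by
            rcases hcases with h | h | h
            exacts [absurd h.symm h0, absurd h.symm h1, h.symm]
          rw [if_pos h2, ← h2, if_neg (fun h => h)]
    · rw [if_neg h30, if_pos (not_lt.mp h30), if_neg (fun h => h)]

-- ===== VERDICT (by name: the statement is the Claim_ definition above) =====
theorem calculate_shear_py_spec : Claim_equal_calculate_shear_py := by
  intro bubbles grid _ _
  unfold Spec_calculate_shear_py calculate_shear_py calculate_shear_py_alt
  exact List.map_congr_left (fun r _ => pv_row_eq bubbles grid r)
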